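-- pv_equiv track=rewrite | github.com/Dirk-Tunderman/email_management | scheduler/utils/scheduling_utils.py | group_by_timezone
-- ===== SOURCE A (Python) =====
-- from typing import Dict, List, Tuple
--
-- def group_by_timezone(emails: List[Dict]) -> Dict[str, List[Dict]]: #####
--     """
--     Group emails by recipient timezone
--     """
--     grouped_emails = {}
--
--     for email in emails:
--         timezone = email.get('time_zone', 'Europe/Amsterdam')  # Default to Amsterdam
--         if timezone not in grouped_emails:
--             grouped_emails[timezone] = []
--         grouped_emails[timezone].append(email)
--
--     return grouped_emails
-- ===== SOURCE B (Python) =====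
-- from typing import Dict, List, Tuple
--
-- def group_by_timezone(emails: List[Dict]) -> Dict[str, List[Dict]]:
--     """
--     Group emails by recipient timezone
--     """
--     def key(e):
--         return e.get('time_zone', 'Europe/Amsterdam')
--     tzs = dict.fromkeys(key(e) for e in emails)  # ordered dedup of the keys
--     return {tz: [e for e in emails if key(e) == tz] for tz in tzs}
-- ===== Notes on version B (the rewrite author's own statement) =====
-- stated objective: alternative
-- what changed: Replaces the single-pass dict accumulation (membership test + per-key append) with a two-phase plan: one pass collecting the distinct timezone keys via dict.fromkeys, then a dict comprehension that builds each group by filtering the email list per key.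
import Mathlib
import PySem

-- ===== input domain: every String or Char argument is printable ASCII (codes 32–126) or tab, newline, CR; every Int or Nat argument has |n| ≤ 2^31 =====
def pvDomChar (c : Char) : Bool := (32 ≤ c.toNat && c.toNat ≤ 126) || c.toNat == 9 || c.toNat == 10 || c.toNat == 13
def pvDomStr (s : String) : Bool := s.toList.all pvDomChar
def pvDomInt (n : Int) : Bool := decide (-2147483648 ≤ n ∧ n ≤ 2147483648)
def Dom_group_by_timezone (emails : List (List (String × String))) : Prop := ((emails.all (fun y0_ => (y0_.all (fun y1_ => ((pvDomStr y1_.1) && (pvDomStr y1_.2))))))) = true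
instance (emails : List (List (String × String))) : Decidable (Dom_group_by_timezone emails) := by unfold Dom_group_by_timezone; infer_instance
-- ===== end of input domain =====

-- B groups by two phases (ordered dedup of the keys, then a filter per key) instead of A's
-- one-pass dict accumulation; same result, different decomposition (objective: alternative).

-- ===== PORT A =====
def group_by_timezone (emails : List (List (String × String))) : List (String × List (List (String × String))) :=
  (emails.foldl
    (fun grouped email =>
      let timezone := (PySem.Dict.mk email).getD "time_zone" "Europe/Amsterdam"
      let grouped := if grouped.contains timezone then grouped
                     else grouped.insert timezone ([] : List (List (String × String)))
      grouped.modify timezone [] (fun l => l ++ [email]))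
    PySem.Dict.empty).items

-- ===== PORT B =====
def pvKey (e : List (String × String)) : String :=
  (PySem.Dict.mk e).getD "time_zone" "Europe/Amsterdam"

def group_by_timezone_alt (emails : List (List (String × String))) : List (String × List (List (String × String))) :=
  (PySem.List.dedup (emails.map pvKey)).map
    (fun tz => (tz, emails.filter (fun e => pvKey e == tz)))

-- ===== PRECONDITION & SPEC =====
def Spec_group_by_timezone (emails : List (List (String × String))) (out : List (String × List (List (String × String)))) : Prop := out = group_by_timezone_alt emails
instance (emails : List (List (String × String))) (out : List (String × List (List (String × String)))) : Decidable (Spec_group_by_timezone emails out) := by unfold Spec_group_by_timezone; infer_instance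

-- ===== CLAIM (what is proved, stated in full; the proofs are below) =====
def Claim_equal_group_by_timezone : Prop := ∀ (emails : List (List (String × String))), Dom_group_by_timezone emails → Spec_group_by_timezone emails (group_by_timezone emails)

-- ===== LEMMAS AND PROOFS =====

-- the pair-keyed fold the PySem library lemmas speak about
def pvFold (emails : List (List (String × String))) : PySem.Dict String (List (List (String × String))) :=
  List.foldl (fun (d : PySem.Dict String (List (List (String × String)))) (p : String × List (String × String)) =>
    d.modify p.1 [] (fun l => l ++ [p.2])) PySem.Dict.empty (emails.map (fun e => (pvKey e, e)))

-- A's "ensure key present, then append" step is exactly one Dict.modify.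
theorem pv_step_eq {κ ν : Type} [BEq κ] [LawfulBEq κ] (g : PySem.Dict κ (List ν)) (k : κ) (x : ν) :
    (if g.contains k then g else g.insert k ([] : List ν)).modify k [] (fun l => l ++ [x])
      = g.modify k [] (fun l => l ++ [x]) := by
  by_cases h : g.contains k
  · simp [h]
  · have h' : g.contains k = false := by simpa using h
    have hid : ∀ p ∈ g.items, (p.1 == k) = false := by
      intro p hp
      by_contra hc
      have : g.contains k = true := by
        simp only [PySem.Dict.contains, List.any_eq_true]
        exact ⟨p, hp, by simpa using hc⟩
      simp [this] at h'
    have hg0 : g.getD k ([] : List ν) = [] := PySem.Dict.getD_of_not_contains g _ h'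
    have hmap : List.map (fun p : κ × List ν => if (p.1 == k) = true then (k, [] ++ [x]) else p) g.items
        = g.items := by
      conv_rhs => rw [← List.map_id g.items]
      exact List.map_congr_left (fun p hp => by simp [hid p hp])
    have hR : (g.modify k [] (fun l => l ++ [x])).items = g.items ++ [(k, [] ++ [x])] := by
      simp only [PySem.Dict.modify, hg0]
      exact PySem.Dict.items_insert_of_not_contains g _ h'
    have hL : ((g.insert k ([] : List ν)).modify k [] (fun l => l ++ [x])).items
        = g.items ++ [(k, [] ++ [x])] := by
      simp only [PySem.Dict.modify, PySem.Dict.getD_insert_self]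
      rw [PySem.Dict.items_insert_of_contains _ _ (PySem.Dict.contains_insert_self g k []),
        PySem.Dict.items_insert_of_not_contains g _ h', List.map_append, hmap]
      simp
    calc (if g.contains k then g else g.insert k ([] : List ν)).modify k [] (fun l => l ++ [x])
        = PySem.Dict.mk (((if g.contains k then g else g.insert k ([] : List ν)).modify k []
            (fun l => l ++ [x])).items) := rfl
      _ = PySem.Dict.mk ((g.modify k [] (fun l => l ++ [x])).items) := by
            rw [hR]; simp only [h', Bool.false_eq_true, if_false]; rw [hL]
      _ = g.modify k [] (fun l => l ++ [x]) := rfl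

-- a pair list with nodup keys equals its keys paired with their dict lookups
theorem pv_items_eq_keys_map {κ ν : Type} [BEq κ] [LawfulBEq κ] (ps : List (κ × ν)) (d0 : ν)
    (h : (ps.map Prod.fst).Nodup) :
    ps = (ps.map Prod.fst).map (fun k => (k, (PySem.Dict.mk ps).getD k d0)) := by
  induction ps with
  | nil => simp
  | cons p rest ih =>
    obtain ⟨k, v⟩ := p
    simp only [List.map_cons] at h ⊢
    have hnd := h.of_cons
    have hk : k ∉ rest.map Prod.fst := (List.nodup_cons.mp h).1
    congr 1
    · simp [PySem.Dict.getD_eq_get?_getD, PySem.Dict.get?_mk_cons]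
    · have hsame : ∀ k' ∈ rest.map Prod.fst,
          (fun k' => (k', (PySem.Dict.mk ((k, v) :: rest)).getD k' d0)) k'
            = (fun k' => (k', (PySem.Dict.mk rest).getD k' d0)) k' := by
        intro k' hk'
        have hne : (k == k') = false := by
          by_contra hc
          have : k = k' := eq_of_beq (by simpa using hc)
          exact hk (this ▸ hk')
        simp [PySem.Dict.getD_eq_get?_getD, PySem.Dict.get?_mk_cons, hne]
      rw [List.map_congr_left hsame, ← ih hnd]

-- A's fold, rewritten to the pair-keyed fold
theorem pv_A_eq_pvFold (emails : List (List (String × String))) :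
    group_by_timezone emails = (pvFold emails).items := by
  unfold group_by_timezone pvFold
  rw [List.foldl_map (f := fun e => (pvKey e, e))
    (g := fun (d : PySem.Dict String (List (List (String × String)))) (p : String × List (String × String)) =>
      d.modify p.1 [] (fun l => l ++ [p.2]))]
  congr 1
  apply List.foldl_ext
  intro g e _
  exact pv_step_eq g (pvKey e) e

theorem pv_fold_keys (emails : List (List (String × String))) :
    (pvFold emails).keys = PySem.List.dedup (emails.map pvKey) := by
  unfold pvFold
  rw [PySem.Dict.keys_foldl_modify_key _ Prod.fst ([] : List (List (String × String)))
    (fun _ p => fun l => l ++ [p.2]) PySem.Dict.empty]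
  simp [PySem.List.dedup, PySem.Set.ofList, PySem.Set.update, PySem.Dict.keys_empty,
    List.map_map, Function.comp_def]

theorem pv_fold_getD (emails : List (List (String × String))) (k : String) :
    (pvFold emails).getD k [] = emails.filter (fun e => pvKey e == k) := by
  unfold pvFold
  rw [PySem.Dict.getD_foldl_modify_append, List.filter_map]
  simp [Function.comp_def]

-- ===== VERDICT (by name: the statement is the Claim_ definition above) =====
theorem group_by_timezone_spec : Claim_equal_group_by_timezone := by
  intro emails _
  unfold Spec_group_by_timezone group_by_timezone_alt
  rw [pv_A_eq_pvFold]
  have hnodup : (pvFold emails).keys.Nodup := by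
    rw [pv_fold_keys]
    exact PySem.Set.nodup_ofList _
  calc (pvFold emails).items
      = ((pvFold emails).items.map Prod.fst).map
          (fun k => (k, (PySem.Dict.mk (pvFold emails).items).getD k [])) := by
        apply pv_items_eq_keys_map
        simpa [PySem.Dict.keys, Function.comp_def] using hnodup
    _ = (pvFold emails).keys.map (fun k => (k, (pvFold emails).getD k [])) := rfl
    _ = (PySem.List.dedup (emails.map pvKey)).map
          (fun tz => (tz, emails.filter (fun e => pvKey e == tz))) := by
        rw [pv_fold_keys]
        exact List.map_congr_left (fun k _ => by rw [pv_fold_getD emails k])
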